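-- pv_equiv track=rewrite | github.com/SzymonIwaniuk/data_structures_and_algorithms | exams/egzP9/egzP9b.py | graph_preparation
-- ===== SOURCE A (Python) =====
-- def graph_preparation(
--     G: list[list[int]], R: list[list[int]], n: int
-- ) -> list[list[int]]:
--     is_road = [[] for _ in range(n)]
--     new_G = [[] for _ in range(n)]
--
--     for i in range(n):
--         for j in range(len(G[i])):
--             is_road[i].append(True)
--
--     for i in range(n):
--         G[i].sort()
--         R[i].sort()
--
--     for i in range(n):
--         j = 0
--         k = 0
--         l1 = len(G[i])
--         l2 = len(R[i])
--
--         while j < l1 and k < l2: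
--             if G[i][j] == R[i][k]:
--                 is_road[i][j] = False
--                 k += 1
--                 j += 1
--
--             elif G[i][j] > R[i][k]:
--                 k += 1
--
--             else:
--                 j += 1
--
--     for i in range(n):
--         for j in range(len(G[i])):
--             if is_road[i][j]:
--                 new_G[i].append(G[i][j])
--
--     return new_G
-- ===== SOURCE B (Python) =====
-- def graph_preparation(
--     G: list[list[int]], R: list[list[int]], n: int
-- ) -> list[list[int]]:
--     new_G = []
--     for i in range(n):
--         G[i].sort()
--         R[i].sort()
--         cnt = {}
--         for x in R[i]:
--             cnt[x] = cnt.get(x, 0) + 1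
--         row = []
--         for x in G[i]:
--             c = cnt.get(x, 0)
--             if c:
--                 cnt[x] = c - 1
--             else:
--                 row.append(x)
--         new_G.append(row)
--     return new_G
-- ===== Notes on version B (the rewrite author's own statement) =====
-- stated objective: simpler
-- what changed: Replaces the is_road boolean matrix, the two-pointer merge over indices and the separate rebuild loop by a single per-row pass: build a multiset count dict of R[i] and copy each element of the sorted G[i] only when its remaining count is zero (decrementing otherwise).
import Mathlib
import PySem

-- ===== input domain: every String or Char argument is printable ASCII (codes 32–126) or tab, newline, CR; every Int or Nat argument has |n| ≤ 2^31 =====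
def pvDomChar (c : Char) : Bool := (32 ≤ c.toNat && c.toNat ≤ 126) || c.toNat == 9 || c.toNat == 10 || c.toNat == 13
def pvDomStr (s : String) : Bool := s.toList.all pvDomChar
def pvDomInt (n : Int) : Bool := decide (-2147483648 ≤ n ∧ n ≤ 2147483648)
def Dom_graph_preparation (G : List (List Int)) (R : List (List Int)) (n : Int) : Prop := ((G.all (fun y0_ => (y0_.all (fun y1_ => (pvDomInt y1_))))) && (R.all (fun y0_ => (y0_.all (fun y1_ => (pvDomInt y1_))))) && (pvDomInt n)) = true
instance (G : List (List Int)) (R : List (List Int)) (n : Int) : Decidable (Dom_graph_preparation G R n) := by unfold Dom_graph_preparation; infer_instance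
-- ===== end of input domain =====

-- B replaces A's is_road boolean matrix + two-pointer merge + rebuild loop by one per-row
-- pass over the sorted G[i] against a multiset-count dict of R[i] (objective: simpler).
-- Both A and B sort G[i] and R[i] in place for i < n; the equivalence proved is about the return value
-- (the in-place sorts are identical in A and B anyway).


-- ===== PORT A =====
-- the while loop of A, recursing on the two cursors j (into g) and k (into r), marking is_road[j] := False on a match
def mergeMark (g r : List Int) (j k : Nat) (isr : List Bool) : List Bool :=
  if h : j < g.length ∧ k < r.length then
    if g.getD j 0 = r.getD k 0 then
      mergeMark g r (j + 1) (k + 1) (isr.set j false)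
    else if g.getD j 0 > r.getD k 0 then
      mergeMark g r j (k + 1) isr
    else
      mergeMark g r (j + 1) k isr
  else isr
termination_by (g.length - j) + (r.length - k)
decreasing_by all_goals omega

def graph_preparation (G : List (List Int)) (R : List (List Int)) (n : Int) : List (List Int) :=
  -- is_road = [[] for _ in range(n)]; for i in range(n): for j in range(len(G[i])): is_road[i].append(True)
  let is_road : List (List Bool) :=
    (PySem.List.pyRange 0 n 1).foldl (fun acc i =>
      acc ++ [(PySem.List.pyRange 0 ((G.getD i.toNat []).length : Int) 1).foldl
                (fun row _ => row ++ [true]) []]) []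
  -- for i in range(n): G[i].sort(); R[i].sort()
  let G1 := (PySem.List.pyRange 0 n 1).foldl
    (fun acc i => acc.set i.toNat (PySem.List.sorted (acc.getD i.toNat []) (fun x => x) false)) G
  let R1 := (PySem.List.pyRange 0 n 1).foldl
    (fun acc i => acc.set i.toNat (PySem.List.sorted (acc.getD i.toNat []) (fun x => x) false)) R
  -- the while-loop pass, updating is_road[i]
  let is_road2 := (PySem.List.pyRange 0 n 1).foldl
    (fun acc i => acc.set i.toNat
      (mergeMark (G1.getD i.toNat []) (R1.getD i.toNat []) 0 0 (acc.getD i.toNat []))) is_road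
  -- for i in range(n): for j in range(len(G[i])): if is_road[i][j]: new_G[i].append(G[i][j])
  (PySem.List.pyRange 0 n 1).foldl (fun acc i =>
    acc ++ [(PySem.List.pyRange 0 ((G1.getD i.toNat []).length : Int) 1).foldl
              (fun row j =>
                if (is_road2.getD i.toNat []).getD j.toNat true then
                  row ++ [(G1.getD i.toNat []).getD j.toNat 0]
                else row) []]) []

-- ===== PORT B =====
def graph_preparation_alt (G : List (List Int)) (R : List (List Int)) (n : Int) : List (List Int) :=
  (PySem.List.pyRange 0 n 1).foldl (fun newG i =>
    let g := PySem.List.sorted (G.getD i.toNat []) (fun x => x) false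
    let r := PySem.List.sorted (R.getD i.toNat []) (fun x => x) false
    -- cnt = {}; for x in r: cnt[x] = cnt.get(x, 0) + 1
    let cnt : PySem.Dict Int Int := r.foldl (fun d x => d.insert x (d.getD x 0 + 1)) PySem.Dict.empty
    -- row = []; for x in g: c = cnt.get(x,0); if c: cnt[x] = c-1 else row.append(x)
    let p := g.foldl (fun (p : List Int × PySem.Dict Int Int) x =>
        let c := p.2.getD x 0
        if c ≠ 0 then (p.1, p.2.insert x (c - 1)) else (p.1 ++ [x], p.2)) ([], cnt)
    newG ++ [p.1]) []

-- ===== PRECONDITION & SPEC =====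
-- Pre_ excludes exactly the inputs where A raises IndexError: G[i] / R[i] for i in range(n) needs n ≤ len(G) and n ≤ len(R).
def Pre_graph_preparation (G : List (List Int)) (R : List (List Int)) (n : Int) : Prop :=
  n ≤ (G.length : Int) ∧ n ≤ (R.length : Int)
instance (G : List (List Int)) (R : List (List Int)) (n : Int) : Decidable (Pre_graph_preparation G R n) := by unfold Pre_graph_preparation; infer_instance
def pvWitness_graph_preparation : List (List Int) × List (List Int) × Int := ([[2, 1, 2], [5]], [[2, 3], []], 2)
def Spec_graph_preparation (G : List (List Int)) (R : List (List Int)) (n : Int) (out : List (List Int)) : Prop := out = graph_preparation_alt G R n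
instance (G : List (List Int)) (R : List (List Int)) (n : Int) (out : List (List Int)) : Decidable (Spec_graph_preparation G R n out) := by unfold Spec_graph_preparation; infer_instance

-- ===== CLAIM (what is proved, stated in full; the proofs are below) =====
def Claim_equal_graph_preparation : Prop := ∀ (G : List (List Int)) (R : List (List Int)) (n : Int), Dom_graph_preparation G R n → Pre_graph_preparation G R n → Spec_graph_preparation G R n (graph_preparation G R n)

-- ===== LEMMAS AND PROOFS =====

-- reference value of one row: multiset difference of two sorted lists by a two-pointer walk
def sd : List Int → List Int → List Int
  | [], _ => []
  | a :: g, [] => a :: g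
  | a :: g, b :: r =>
    if a = b then sd g r
    else if a > b then sd (a :: g) r
    else a :: sd g (b :: r)

-- filter a list by a parallel boolean mask
def zf : List Int → List Bool → List Int
  | x :: g, b :: is => if b then x :: zf g is else zf g is
  | _, _ => []

-- B's per-row pass, as a recursion
def bpass : List Int → PySem.Dict Int Int → List Int
  | [], _ => []
  | x :: g, d =>
    if d.getD x 0 ≠ 0 then bpass g (d.insert x (d.getD x 0 - 1)) else x :: bpass g d

theorem zf_append (a c : List Int) (b d : List Bool) (h : a.length = b.length) :
    zf (a ++ c) (b ++ d) = zf a b ++ zf c d := by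
  induction a generalizing b with
  | nil =>
    cases b with
    | nil => simp [zf]
    | cons => simp at h
  | cons x a ih =>
    cases b with
    | nil => simp at h
    | cons y b =>
      simp only [List.length_cons, Nat.add_right_cancel_iff] at h
      simp only [List.cons_append, zf]
      split <;> simp [ih b h]

theorem zf_all_true (g : List Int) (isr : List Bool) (h : ∀ x ∈ isr, x = true)
    (hl : isr.length = g.length) : zf g isr = g := by
  induction g generalizing isr with
  | nil => cases isr <;> simp [zf]
  | cons x g ih =>
    cases isr with
    | nil => simp at hl
    | cons b isr =>
      have hb : b = true := h b (by simp)
      simp only [zf, hb, if_true]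
      simp only [List.length_cons, Nat.add_right_cancel_iff] at hl
      rw [ih isr (fun y hy => h y (by simp [hy])) hl]

theorem length_mergeMark (g r : List Int) (j k : Nat) (isr : List Bool) :
    (mergeMark g r j k isr).length = isr.length := by
  fun_induction mergeMark g r j k isr <;> simp_all

theorem mergeMark_zf (g r : List Int) (j k : Nat) (isr : List Bool)
    (hl : isr.length = g.length) (ht : ∀ m, j ≤ m → isr.getD m true = true) :
    zf g (mergeMark g r j k isr) =
      zf (g.take j) (isr.take j) ++ sd (g.drop j) (r.drop k) := by
  revert hl ht
  fun_induction mergeMark g r j k isr with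
  | case1 j k isr h heq ih =>
    intro hl ht
    have hlen2 : (isr.set j false).length = g.length := by rw [List.length_set]; exact hl
    have ht2 : ∀ m, j + 1 ≤ m → (isr.set j false).getD m true = true := by
      intro m hm
      rw [List.getD_eq_getElem?_getD, List.getElem?_set_ne (by omega),
        ← List.getD_eq_getElem?_getD]
      exact ht m (by omega)
    rw [ih hlen2 ht2]
    have hdg : g.drop j = g[j] :: g.drop (j + 1) := List.drop_eq_getElem_cons h.1
    have hdr : r.drop k = r[k] :: r.drop (k + 1) := List.drop_eq_getElem_cons h.2
    have hgj : g.getD j 0 = g[j] := List.getD_eq_getElem _ _ h.1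
    have hrk : r.getD k 0 = r[k] := List.getD_eq_getElem _ _ h.2
    rw [hdg, hdr, sd, if_pos (by rw [← hgj, ← hrk]; exact heq)]
    -- take (j+1) of g and of isr.set j false
    have htg : g.take (j + 1) = g.take j ++ [g[j]] := by
      rw [List.take_succ, List.getElem?_eq_getElem h.1]; rfl
    have hti : (isr.set j false).take (j + 1) = isr.take j ++ [false] := by
      rw [List.take_succ]
      rw [List.getElem?_set_self (by omega)]
      congr 1
      exact List.take_set_of_le (Nat.le_refl j)
    rw [htg, hti, zf_append _ _ _ _ (by rw [List.length_take, List.length_take, hl])]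
    simp [zf]
  | case2 j k isr h hne hgt ih =>
    intro hl ht
    rw [ih hl ht]
    have hdg : g.drop j = g[j] :: g.drop (j + 1) := List.drop_eq_getElem_cons h.1
    have hdr : r.drop k = r[k] :: r.drop (k + 1) := List.drop_eq_getElem_cons h.2
    have hgj : g.getD j 0 = g[j] := List.getD_eq_getElem _ _ h.1
    have hrk : r.getD k 0 = r[k] := List.getD_eq_getElem _ _ h.2
    rw [hdg, hdr, sd, if_neg (by rw [← hgj, ← hrk]; exact hne),
      if_pos (by rw [← hgj, ← hrk]; exact hgt), ← hdg]
  | case3 j k isr h hne hngt ih =>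
    intro hl ht
    rw [ih hl (fun m hm => ht m (by omega))]
    have hdg : g.drop j = g[j] :: g.drop (j + 1) := List.drop_eq_getElem_cons h.1
    have hdr : r.drop k = r[k] :: r.drop (k + 1) := List.drop_eq_getElem_cons h.2
    have hgj : g.getD j 0 = g[j] := List.getD_eq_getElem _ _ h.1
    have hrk : r.getD k 0 = r[k] := List.getD_eq_getElem _ _ h.2
    have htg : g.take (j + 1) = g.take j ++ [g[j]] := by
      rw [List.take_succ, List.getElem?_eq_getElem h.1]; rfl
    have hjl : j < isr.length := by omega
    have hti : isr.take (j + 1) = isr.take j ++ [true] := by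
      rw [List.take_succ, List.getElem?_eq_getElem hjl]
      have : isr[j] = true := by
        have := ht j (Nat.le_refl j)
        rwa [List.getD_eq_getElem?_getD, List.getElem?_eq_getElem hjl] at this
      rw [this]; rfl
    rw [htg, hti, zf_append _ _ _ _ (by rw [List.length_take, List.length_take, hl])]
    rw [hdg, hdr, sd, if_neg (by rw [← hgj, ← hrk]; exact hne),
      if_neg (by rw [← hgj, ← hrk]; exact hngt), ← hdr]
    simp [zf]
  | case4 j k isr h =>
    intro hl ht
    rcases Nat.lt_or_ge j g.length with hj | hj
    · -- then k ≥ r.length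
      have hk : r.length ≤ k := by omega
      rw [List.drop_eq_nil_of_le hk]
      have hsd : sd (g.drop j) [] = g.drop j := by
        rw [List.drop_eq_getElem_cons hj, sd]
      rw [hsd]
      calc zf g isr = zf (g.take j ++ g.drop j) (isr.take j ++ isr.drop j) := by
            rw [List.take_append_drop, List.take_append_drop]
        _ = zf (g.take j) (isr.take j) ++ zf (g.drop j) (isr.drop j) :=
            zf_append _ _ _ _ (by rw [List.length_take, List.length_take, hl])
        _ = zf (g.take j) (isr.take j) ++ g.drop j := by
            rw [zf_all_true (g.drop j) (isr.drop j) ?_ (by rw [List.length_drop, List.length_drop, hl])]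
            intro x hx
            rcases List.getElem_of_mem hx with ⟨p, hp, hpx⟩
            have := ht (j + p) (by omega)
            rw [List.getD_eq_getElem?_getD, List.getElem?_eq_getElem (by rw [List.length_drop] at hp; omega)] at this
            rw [← hpx, List.getElem_drop]
            exact this
    · -- j ≥ g.length
      rw [List.drop_eq_nil_of_le hj, List.take_of_length_le hj, List.take_of_length_le (by omega), sd]
      simp


theorem bpass_foldl (g : List Int) (out : List Int) (d : PySem.Dict Int Int) :
    (g.foldl (fun (p : List Int × PySem.Dict Int Int) x =>
        let c := p.2.getD x 0
        if c ≠ 0 then (p.1, p.2.insert x (c - 1)) else (p.1 ++ [x], p.2)) (out, d)).1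
      = out ++ bpass g d := by
  induction g generalizing out d with
  | nil => simp [bpass]
  | cons x g ih =>
    rw [List.foldl_cons]
    show (List.foldl _ (if d.getD x 0 ≠ 0 then (out, d.insert x (d.getD x 0 - 1)) else (out ++ [x], d)) g).1 = _
    unfold bpass
    split_ifs with h
    · exact ih out (d.insert x (d.getD x 0 - 1))
    · rw [ih (out ++ [x]) d]; simp

theorem bpass_sublist (g : List Int) (d : PySem.Dict Int Int) : List.Sublist (bpass g d) g := by
  fun_induction bpass g d with
  | case1 => exact List.Sublist.refl _
  | case2 x g d h ih => exact ih.cons x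
  | case3 x g d h ih => exact ih.cons₂ x

theorem bpass_count (g : List Int) (d : PySem.Dict Int Int) (hd : ∀ v, 0 ≤ d.getD v 0)
    (v : Int) :
    ((bpass g d).count v : Int) = (g.count v : Int) - min (g.count v : Int) (d.getD v 0) := by
  induction g generalizing d with
  | nil => simp [bpass]; have := hd v; omega
  | cons x g ih =>
    unfold bpass
    split_ifs with h
    · have hx := hd x
      have ih' := ih (d.insert x (d.getD x 0 - 1)) (fun w => by
        rw [PySem.Dict.getD_insert]; split_ifs with hw
        · omega
        · exact hd w)
      rw [PySem.Dict.getD_insert] at ih'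
      simp only [List.count_cons]
      by_cases hvx : v = x
      · rw [if_pos hvx] at ih'
        subst hvx
        simp only [BEq.rfl, if_pos] at *
        push_cast at *
        omega
      · rw [if_neg hvx] at ih'
        have : (x == v) = false := by simp [Ne.symm hvx]
        simp only [this] at *
        push_cast at *
        omega
    · have hdv := hd v
      have ih' := ih d hd
      simp only [List.count_cons]
      by_cases hvx : v = x
      · subst hvx
        simp only [BEq.rfl, if_pos] at *
        push_cast at *
        omega
      · have : (x == v) = false := by simp [Ne.symm hvx]
        simp only [this] at *
        push_cast at *
        omega


theorem sd_sublist (g r : List Int) : List.Sublist (sd g r) g := by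
  fun_induction sd g r with
  | case1 => exact List.nil_sublist _
  | case2 => exact List.Sublist.refl _
  | case3 => exact List.Sublist.cons _ (by assumption)
  | case4 => assumption
  | case5 => exact List.Sublist.cons₂ _ (by assumption)

theorem sd_count (g r : List Int) (hg : g.Pairwise (· ≤ ·)) (hr : r.Pairwise (· ≤ ·))
    (v : Int) :
    ((sd g r).count v : Int) = (g.count v : Int) - min (g.count v : Int) (r.count v : Int) := by
  induction g, r using sd.induct with
  | case1 r => simp [sd]
  | case2 a g => simp [sd]
  | case3 g b r ih =>
    have ih' := ih (List.pairwise_cons.mp hg).2 (List.pairwise_cons.mp hr).2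
    rw [show sd (b :: g) (b :: r) = sd g r by rw [sd]; simp]
    simp only [List.count_cons] at *
    by_cases hv : b = v <;> simp only [hv] at * <;> simp at * <;> omega
  | case4 a g b r h1 h2 ih =>
    have ih' := ih hg (List.pairwise_cons.mp hr).2
    rw [show sd (a :: g) (b :: r) = sd (a :: g) r by rw [sd]; rw [if_neg h1, if_pos h2]]
    by_cases hv : v = b
    · have h1 : (a == v) = false := by simp; omega
      have h2 : (b == v) = true := by simp [hv]
      have hvg : (a :: g).count v = 0 := by
        apply List.count_eq_zero_of_not_mem
        intro hmem
        rcases List.mem_cons.mp hmem with hh | hh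
        · omega
        · have := (List.pairwise_cons.mp hg).1 v hh
          omega
      simp only [List.count_cons, h1, h2, if_true] at *
      push_cast at *
      omega
    · have h2 : (b == v) = false := by simp [Ne.symm hv]
      simp only [List.count_cons, h2] at *
      push_cast at *
      omega
  | case5 a g b r h1 h2 ih =>
    have ih' := ih (List.pairwise_cons.mp hg).2 hr
    rw [show sd (a :: g) (b :: r) = a :: sd g (b :: r) by rw [sd]; rw [if_neg h1, if_neg h2]]
    by_cases hv : v = a
    · have h1 : (a == v) = true := by simp [hv]
      have h2 : (b == v) = false := by simp; omega
      have hvr : (b :: r).count v = 0 := by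
        apply List.count_eq_zero_of_not_mem
        intro hmem
        rcases List.mem_cons.mp hmem with hh | hh
        · omega
        · have := (List.pairwise_cons.mp hr).1 v hh
          omega
      simp only [List.count_cons, h1, h2, if_true] at *
      push_cast at *
      omega
    · have h1 : (a == v) = false := by simp [Ne.symm hv]
      simp only [List.count_cons, h1] at *
      push_cast at *
      omega


theorem eq_counts_sorted (xs ys g : List Int) (hg : g.Pairwise (· ≤ ·)) (hx : List.Sublist xs g)
    (hy : List.Sublist ys g) (hc : ∀ v, xs.count v = ys.count v) : xs = ys := by
  exact List.Perm.eq_of_pairwise' (hg.sublist hx) (hg.sublist hy) (List.perm_iff_count.mpr hc)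

theorem getD_replicate_true (n m : Nat) : (List.replicate n true).getD m true = true := by
  unfold List.getD
  rcases Nat.lt_or_ge m n with h | h
  · rw [List.getElem?_replicate, if_pos h]; rfl
  · rw [List.getElem?_eq_none (by simpa using h)]; rfl

-- one row of A equals sd of the sorted rows
theorem row_A (g r : List Int) :
    zf g (mergeMark g r 0 0 (List.replicate g.length true)) = sd g r := by
  rw [mergeMark_zf g r 0 0 _ (by simp) (fun m _ => getD_replicate_true _ _)]
  simp [zf]

-- one row of B equals sd of the sorted rows
theorem row_B (g r : List Int) (hg : g.Pairwise (· ≤ ·)) (hr : r.Pairwise (· ≤ ·)) :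
    bpass g (PySem.Dict.counter r) = sd g r := by
  refine eq_counts_sorted _ _ g hg (bpass_sublist _ _) (sd_sublist _ _) fun v => ?_
  have h1 := bpass_count g (PySem.Dict.counter r) (fun w => by simp [PySem.Dict.getD_counter]) v
  have h2 := sd_count g r hg hr v
  simp only [PySem.Dict.getD_counter] at h1
  omega

theorem foldl_set_length {α : Type} (f : Nat → α → α) (d : α) (L : List α) (m : Nat) :
    ((List.range m).foldl (fun acc t => acc.set t (f t (acc.getD t d))) L).length
      = L.length := by
  induction m with
  | zero => simp
  | succ m ih => rw [List.range_succ, List.foldl_append, List.foldl_cons, List.foldl_nil, List.length_set]; exact ih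

-- a foldl of sets over range m read back through getD
theorem foldl_set_getD {α : Type} (f : Nat → α → α) (d : α) (L : List α) (m : Nat) (i : Nat) :
    ((List.range m).foldl (fun acc t => acc.set t (f t (acc.getD t d))) L).getD i d
      = if i < m ∧ i < L.length then f i (L.getD i d) else L.getD i d := by
  induction m with
  | zero => simp
  | succ m ih =>
    rw [List.range_succ, List.foldl_append, List.foldl_cons, List.foldl_nil]
    have hlen := foldl_set_length f d L m
    by_cases him : i = m
    · subst him
      by_cases hiL : i < L.length
      · rw [List.getD_eq_getElem?_getD, List.getElem?_set_self (by omega), if_pos ⟨by omega, hiL⟩]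
        simp only [Option.getD_some]
        rw [List.getD_eq_getElem?_getD] at ih ⊢
        rw [ih, if_neg (by omega)]
      · rw [if_neg (by omega)]
        rw [List.getD_eq_getElem?_getD, List.getElem?_set, if_pos rfl, hlen, if_neg (by omega)]
        rw [List.getD_eq_getElem?_getD, List.getElem?_eq_none (by omega)]
    · rw [List.getD_eq_getElem?_getD, List.getElem?_set_ne (by omega)]
      rw [List.getD_eq_getElem?_getD] at ih
      rw [ih]
      by_cases h1 : i < m ∧ i < L.length
      · rw [if_pos h1, if_pos ⟨by omega, h1.2⟩]
      · rw [if_neg h1, if_neg (by omega)]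


theorem zf_eq_filter_range (g : List Int) (isr : List Bool) (hl : isr.length = g.length) :
    ((List.range g.length).filter (fun k => isr.getD k true)).map (fun k => g.getD k 0)
      = zf g isr := by
  induction g generalizing isr with
  | nil => simp [zf]
  | cons x g ih =>
    cases isr with
    | nil => simp at hl
    | cons b isr =>
      simp only [List.length_cons, Nat.add_right_cancel_iff] at hl
      have h1 : ((fun k => (b :: isr).getD k true) ∘ Nat.succ) = fun k => isr.getD k true := by
        funext k; simp
      have h2 : ((fun k => (x :: g).getD k 0) ∘ Nat.succ) = fun k => g.getD k 0 := by
        funext k; simp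
      rw [List.length_cons, List.range_succ_eq_map, List.filter_cons]
      cases b with
      | false =>
        rw [if_neg (by simp), List.filter_map, List.map_map, h1, h2, ih isr hl]
        simp [zf]
      | true =>
        rw [if_pos (by simp), List.map_cons, List.filter_map, List.map_map, h1, h2, ih isr hl]
        simp [zf]

-- both sides equal this map
def refMap (G R : List (List Int)) (m : Nat) : List (List Int) :=
  (List.range m).map (fun t =>
    sd (PySem.List.sorted (G.getD t []) (fun x => x) false)
          (PySem.List.sorted (R.getD t []) (fun x => x) false))

theorem B_eq (G R : List (List Int)) (n : Int) :
    graph_preparation_alt G R n = refMap G R n.toNat := by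
  unfold graph_preparation_alt refMap
  simp only [PySem.List.pyRange_one, Int.sub_zero, zero_add, List.foldl_map, Int.toNat_natCast]
  rw [PySem.List.foldl_append_singleton_eq_map]
  rw [List.nil_append]
  apply List.map_congr_left
  intro t ht
  rw [bpass_foldl, PySem.Dict.foldl_insert_getD_add_one_eq_counter, List.nil_append]
  refine row_B _ _ ?_ ?_
  · simpa using PySem.List.sorted_pairwise (G.getD t []) (fun x => x)
  · simpa using PySem.List.sorted_pairwise (R.getD t []) (fun x => x)

theorem A_eq (G R : List (List Int)) (n : Int) (h1 : n ≤ (G.length : Int))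
    (h2 : n ≤ (R.length : Int)) : graph_preparation G R n = refMap G R n.toNat := by
  have hm1 : n.toNat ≤ G.length := by omega
  have hm2 : n.toNat ≤ R.length := by omega
  unfold graph_preparation
  simp only [PySem.List.pyRange_one, Int.sub_zero, zero_add, List.foldl_map, Int.toNat_natCast]
  set m := n.toNat with hm
  set G1 := (List.range m).foldl
    (fun acc t => acc.set t (PySem.List.sorted (acc.getD t []) (fun x => x) false)) G with hG1def
  set R1 := (List.range m).foldl
    (fun acc t => acc.set t (PySem.List.sorted (acc.getD t []) (fun x => x) false)) R with hR1def
  set isr0 := (List.range m).foldl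
    (fun acc t => acc ++ [(List.range (G.getD t []).length).foldl (fun row _ => row ++ [true]) []])
    ([] : List (List Bool)) with hisr0def
  set isr2 := (List.range m).foldl
    (fun acc t => acc.set t (mergeMark (G1.getD t []) (R1.getD t []) 0 0 (acc.getD t []))) isr0
    with hisr2def
  have hG1 : ∀ t, t < m → G1.getD t [] = PySem.List.sorted (G.getD t []) (fun x => x) false := by
    intro t ht
    have h' := foldl_set_getD (fun _ x => PySem.List.sorted x (fun y => y) false)
      ([] : List Int) G m t
    rw [if_pos ⟨ht, by omega⟩] at h'
    rw [hG1def]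
    simpa using h' 
  have hR1 : ∀ t, t < m → R1.getD t [] = PySem.List.sorted (R.getD t []) (fun x => x) false := by
    intro t ht
    have h' := foldl_set_getD (fun _ x => PySem.List.sorted x (fun y => y) false)
      ([] : List Int) R m t
    rw [if_pos ⟨ht, by omega⟩] at h'
    rw [hR1def]
    simpa using h' 
  have hisr0 : isr0 = (List.range m).map (fun t => List.replicate (G.getD t []).length true) := by
    rw [hisr0def, PySem.List.foldl_append_singleton_eq_map, List.nil_append]
    apply List.map_congr_left
    intro t _
    rw [PySem.List.foldl_append_singleton_eq_map, List.nil_append]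
    rw [List.map_const', List.length_range]
  have hisr0len : isr0.length = m := by rw [hisr0, List.length_map, List.length_range]
  have hisr0get : ∀ t, t < m → isr0.getD t [] = List.replicate (G.getD t []).length true := by
    intro t ht
    rw [hisr0, List.getD_eq_getElem?_getD, List.getElem?_map, List.getElem?_range ht]
    rfl
  have hisr2 : ∀ t, t < m → isr2.getD t [] =
      mergeMark (G1.getD t []) (R1.getD t []) 0 0 (List.replicate (G.getD t []).length true) := by
    intro t ht
    have h' := foldl_set_getD (fun u x => mergeMark (G1.getD u []) (R1.getD u []) 0 0 x)
      ([] : List Bool) isr0 m t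
    rw [if_pos ⟨ht, by omega⟩, hisr0get t ht] at h'
    rw [hisr2def]
    simpa using h' 
  rw [PySem.List.foldl_append_singleton_eq_map, List.nil_append]
  unfold refMap
  apply List.map_congr_left
  intro t ht
  rw [List.mem_range] at ht
  have hlg : (G1.getD t []).length = (G.getD t []).length := by
    rw [hG1 t ht, PySem.List.length_sorted]
  rw [PySem.List.foldl_append_if, List.nil_append]
  have hlen2 : (isr2.getD t []).length = (G1.getD t []).length := by
    rw [hisr2 t ht, length_mergeMark, List.length_replicate, hlg]
  rw [zf_eq_filter_range _ _ hlen2]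
  rw [hisr2 t ht, ← hlg, hG1 t ht, hR1 t ht]
  exact row_A _ _

-- ===== VERDICT (by name: the statement is the Claim_ definition above) =====
theorem graph_preparation_spec : Claim_equal_graph_preparation := by
  intro G R n _ hpre
  unfold Spec_graph_preparation
  rw [A_eq G R n hpre.1 hpre.2, B_eq G R n]
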